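-- pv_equiv track=rewrite | github.com/nopointttt/milana_tarba | telegram-bot/src/services/analytics/name_number.py | validate_latin_name
-- ===== SOURCE A (Python) =====
-- from typing import Dict
--
-- LETTER_TO_NUMBER: Dict[str, int] = {
--     # 1
--     'A': 1, 'I': 1, 'J': 1, 'Q': 1, 'Y': 1,
--     # 2
--     'B': 2, 'K': 2, 'R': 2,
--     # 3
--     'C': 3, 'L': 3, 'S': 3, 'G': 3,
--     # 4
--     'D': 4, 'M': 4, 'T': 4,
--     # 5
--     'E': 5, 'N': 5, 'X': 5,
--     # 6
--     'F': 6, 'O': 6, 'U': 6, 'V': 6,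
--     # 7
--     'P': 7, 'W': 7,
--     # 8
--     'H': 8, 'Z': 8,
--     # 9
-- }
--
-- def validate_latin_name(name: str) -> bool:
--     """Проверить, что имя содержит только латинские буквы.
--
--     :param name: Имя для проверки
--     :return: True если имя валидно
--     """
--     if not name or not name.strip():
--         return False
--
--     name = name.strip().upper()
--     for letter in name:
--         if letter != ' ' and letter not in LETTER_TO_NUMBER:
--             return False
--
--     return True
-- ===== SOURCE B (Python) =====
-- def validate_latin_name(name: str) -> bool:
--     """Strip, delete the spaces, then classify what is left with the str
--     predicates: valid iff the space-free remainder is ASCII-alphabetic."""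
--     compact = name.strip().replace(' ', '')
--     return compact.isascii() and compact.isalpha()
-- ===== Notes on version B (the rewrite author's own statement) =====
-- stated objective: idiomatic
-- what changed: A uppercases the stripped name and runs an explicit early-return loop testing each character for membership in the letter-value dict; B never loops or consults any membership container: it deletes the spaces from the stripped name with str.replace and delegates the whole check to the built-in classification predicates str.isascii and str.isalpha.
import Mathlib
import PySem

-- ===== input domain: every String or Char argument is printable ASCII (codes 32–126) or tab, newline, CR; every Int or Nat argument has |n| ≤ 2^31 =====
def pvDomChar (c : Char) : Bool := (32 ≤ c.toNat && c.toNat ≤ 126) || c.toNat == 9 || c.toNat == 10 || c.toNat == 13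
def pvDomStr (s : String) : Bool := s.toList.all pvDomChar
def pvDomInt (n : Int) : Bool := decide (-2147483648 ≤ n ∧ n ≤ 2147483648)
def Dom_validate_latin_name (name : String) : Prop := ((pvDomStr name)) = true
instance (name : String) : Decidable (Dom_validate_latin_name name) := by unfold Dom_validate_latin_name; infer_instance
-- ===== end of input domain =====

-- B replaces A's per-character early-return membership loop over the letter dict by
-- space deletion plus the string classification predicates isascii/isalpha (objective: idiomatic).

-- ===== PORT A =====
-- LETTER_TO_NUMBER; its keys are single characters, so Char keys port the 1-char-string keys
def pvLetterNums : PySem.Dict Char Int := PySem.Dict.ofList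
  [('A',1),('I',1),('J',1),('Q',1),('Y',1),('B',2),('K',2),('R',2),
   ('C',3),('L',3),('S',3),('G',3),('D',4),('M',4),('T',4),
   ('E',5),('N',5),('X',5),('F',6),('O',6),('U',6),('V',6),
   ('P',7),('W',7),('H',8),('Z',8)]

-- 'for letter in name: if letter != ' ' and letter not in LETTER_TO_NUMBER: return False'
def pvA_loop : List Char → Bool
  | [] => true
  | c :: rest =>
    if (c != ' ') && !(pvLetterNums.contains c) then false
    else pvA_loop rest

def validate_latin_name (name : String) : Bool :=
  if (name == "") || (PySem.Str.strip name == "") then false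
  else pvA_loop (PySem.Str.upper (PySem.Str.strip name)).toList

-- ===== PORT B =====
-- compact = name.strip().replace(' ', ''); return compact.isascii() and compact.isalpha()
-- compact.isascii() is ported by hand (PySem has no isascii): all code points ≤ 127, exact.
def validate_latin_name_alt (name : String) : Bool :=
  let compact := PySem.Str.replace (PySem.Str.strip name) " " ""
  (compact.toList.all fun c => decide (c.toNat ≤ 127)) && PySem.Str.strIsalpha compact

-- ===== PRECONDITION & SPEC =====
def Spec_validate_latin_name (name : String) (out : Bool) : Prop := out = validate_latin_name_alt name
instance (name : String) (out : Bool) : Decidable (Spec_validate_latin_name name out) := by unfold Spec_validate_latin_name; infer_instance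

-- ===== CLAIM (what is proved, stated in full; the proofs are below) =====
def Claim_equal_validate_latin_name : Prop := ∀ (name : String), Dom_validate_latin_name name → Spec_validate_latin_name name (validate_latin_name name)

-- ===== LEMMAS AND PROOFS =====

lemma pvCharEq (x y : Char) : (x == y) = decide (x.toNat = y.toNat) := by
  rw [show (x == y) = decide (x = y) from rfl, decide_eq_decide]
  exact ⟨congrArg _, fun h => Char.ext (UInt32.toNat_inj.mp h)⟩

lemma pvCharLe (x y : Char) : (x ≤ y) ↔ (x.toNat ≤ y.toNat) := by
  rw [Char.le_def, UInt32.le_iff_toNat_le]; rfl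

-- A's dict membership is exactly the code-point range of 'A'..'Z'
lemma pvContains_eq (d : Char) :
    pvLetterNums.contains d = decide (65 ≤ d.toNat ∧ d.toNat ≤ 90) := by
  rw [Bool.eq_iff_iff, decide_eq_true_iff]
  constructor
  · intro h
    have hk := (PySem.Dict.contains_iff_mem_keys _ _).mp h
    rw [show pvLetterNums.keys = ['A','I','J','Q','Y','B','K','R','C','L','S','G','D','M','T','E','N','X','F','O','U','V','P','W','H','Z'] from by decide] at hk
    fin_cases hk <;> exact ⟨by decide, by decide⟩
  · rintro ⟨h1, h2⟩
    apply (PySem.Dict.contains_iff_mem_keys _ _).mpr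
    rw [← Char.ofNat_toNat d]
    rw [show pvLetterNums.keys = ['A','I','J','Q','Y','B','K','R','C','L','S','G','D','M','T','E','N','X','F','O','U','V','P','W','H','Z'] from by decide]
    interval_cases d.toNat <;> decide

lemma pvToNat_ofNat_sub32 (n : Nat) (h1 : 97 ≤ n) (h2 : n ≤ 122) :
    (Char.ofNat (n - 32)).toNat = n - 32 := by
  have : Nat.isValidChar (n - 32) := Or.inl (by omega)
  simp [Char.ofNat, this, Char.toNat, Char.ofNatAux]

-- per character: A's test on the uppercased character = B's ascii-and-alpha test (plus space)
lemma pvPerChar (c : Char) :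
    ((PySem.Chars.upperChar c == ' ') || pvLetterNums.contains (PySem.Chars.upperChar c))
      = ((c == ' ') || (decide (c.toNat ≤ 127) && PySem.Chars.isalpha c)) := by
  by_cases hl : PySem.Chars.islower c = true
  · have hb : 97 ≤ c.toNat ∧ c.toNat ≤ 122 := by
      simpa [PySem.Chars.islower, pvCharLe] using hl
    have hu : PySem.Chars.upperChar c = Char.ofNat (c.toNat - 32) := by
      simp [PySem.Chars.upperChar, hl]
    have ht : (Char.ofNat (c.toNat - 32)).toNat = c.toNat - 32 :=
      pvToNat_ofNat_sub32 _ hb.1 hb.2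
    rw [hu, pvCharEq, pvContains_eq, pvCharEq, ht]
    rw [Bool.eq_iff_iff]
    simp only [Bool.or_eq_true, Bool.and_eq_true, decide_eq_true_iff,
      PySem.Chars.isalpha, PySem.Chars.islower, PySem.Chars.isupper, pvCharLe,
      show (' ' : Char).toNat = 32 from rfl,
      show ('A' : Char).toNat = 65 from rfl, show ('Z' : Char).toNat = 90 from rfl,
      show ('a' : Char).toNat = 97 from rfl, show ('z' : Char).toNat = 122 from rfl]
    omega
  · have hu : PySem.Chars.upperChar c = c := by simp [PySem.Chars.upperChar, hl]
    have hnl : 97 ≤ c.toNat → 122 < c.toNat := by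
      intro h; by_contra h2
      exact hl (by simp [PySem.Chars.islower, pvCharLe]; omega)
    rw [hu, pvCharEq, pvContains_eq]
    rw [Bool.eq_iff_iff]
    simp only [Bool.or_eq_true, Bool.and_eq_true, decide_eq_true_iff,
      PySem.Chars.isalpha, PySem.Chars.isupper, PySem.Chars.islower, pvCharLe,
      show (' ' : Char).toNat = 32 from rfl,
      show ('A' : Char).toNat = 65 from rfl, show ('Z' : Char).toNat = 90 from rfl,
      show ('a' : Char).toNat = 97 from rfl, show ('z' : Char).toNat = 122 from rfl]
    omega

-- A's early-return loop is the 'all' of its per-character test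
lemma pvLoop_eq_all : ∀ l : List Char,
    pvA_loop l = l.all (fun c => c == ' ' || pvLetterNums.contains c)
  | [] => rfl
  | c :: rest => by
    show (if (c != ' ') && !(pvLetterNums.contains c) then false else pvA_loop rest) = _
    cases hsp : (c == ' ') <;> cases hct : (pvLetterNums.contains c) <;>
      simp only [bne, hsp, hct, Bool.not_false, Bool.not_true, Bool.and_false, Bool.and_true,
        Bool.false_and, Bool.true_and, if_true, Bool.or_false, Bool.or_true, List.all_cons] <;>
      first
        | rfl
        | exact pvLoop_eq_all rest

-- replace(s, ' ', '') deletes exactly the spaces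
lemma pvReplace_go : ∀ (fuel : Nat) (l acc : List Char), l.length ≤ fuel →
    PySem.Chars.replace.go [' '] [] fuel l acc = acc.reverse ++ l.filter (fun c => !(c == ' '))
  | 0, [], acc, _ => by simp [PySem.Chars.replace.go]
  | 0, c :: t, acc, h => by simp at h
  | fuel + 1, [], acc, _ => by simp [PySem.Chars.replace.go]
  | fuel + 1, c :: t, acc, h => by
    rw [PySem.Chars.replace.go]
    by_cases hc : c = ' '
    · subst hc
      have hp : [' '].isPrefixOf (' ' :: t) = true := by simp [List.isPrefixOf]
      rw [if_pos hp, show List.drop [' '].length (' ' :: t) = t from rfl,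
        show ([] : List Char).reverse ++ acc = acc from rfl]
      rw [pvReplace_go fuel t acc (by simpa using h)]
      simp
    · have hp : ¬ ([' '].isPrefixOf (c :: t) = true) := by
        simp [List.isPrefixOf]
        exact fun hh => hc hh.symm
      rw [if_neg hp]
      rw [pvReplace_go fuel t (c :: acc) (by simpa using h)]
      simp [hc]

lemma pvReplace_filter (l : List Char) :
    PySem.Chars.replace l [' '] [] = l.filter (fun c => !(c == ' ')) := by
  rw [PySem.Chars.replace, if_neg (by decide)]
  simpa using pvReplace_go l.length l [] le_rfl

-- a nonempty stripped string starts with a non-whitespace character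
lemma pvStrip_head (cs : List Char) :
    PySem.Chars.strip cs = [] ∨
      ∃ h t, PySem.Chars.strip cs = h :: t ∧ PySem.Chars.isspace h = false := by
  rw [PySem.Chars.strip, PySem.Chars.lstrip, PySem.Chars.rstrip]
  set L := cs.dropWhile PySem.Chars.isspace with hL
  cases hS : (L.reverse.dropWhile PySem.Chars.isspace).reverse with
  | nil => exact Or.inl rfl
  | cons h t =>
    right
    refine ⟨h, t, rfl, ?_⟩
    have hpre : (L.reverse.dropWhile PySem.Chars.isspace).reverse <+: L := by
      have hsuf := List.dropWhile_suffix (l := L.reverse) PySem.Chars.isspace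
      have := List.reverse_prefix.mpr hsuf
      rwa [List.reverse_reverse] at this
    obtain ⟨rest, hrest⟩ := hpre
    rw [hS] at hrest
    have hL' : cs.dropWhile PySem.Chars.isspace = h :: (t ++ rest) := by
      rw [← hL, ← hrest]; simp
    have hd := List.head_dropWhile_not PySem.Chars.isspace (l := cs)
      (by rw [hL']; simp)
    simpa [hL'] using hd

-- the all over a space-filtered list, as an all over the whole list
lemma pvFilterAll (p : Char → Bool) (l : List Char) :
    (l.filter (fun c => !(c == ' '))).all p = l.all (fun c => (c == ' ') || p c) := by
  induction l with
  | nil => rfl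
  | cons c t ih =>
    cases hc : (c == ' ') <;>
      simp [hc, ih]

lemma pvStringEmpty (s : String) (h : s.toList = []) : s = "" :=
  String.ext (by simpa using h)

-- ===== VERDICT (by name: the statement is the Claim_ definition above) =====
theorem validate_latin_name_spec : Claim_equal_validate_latin_name := by
  intro name _
  simp only [Spec_validate_latin_name, validate_latin_name, validate_latin_name_alt]
  have hrep : (PySem.Str.replace (PySem.Str.strip name) " " "").toList
      = (PySem.Str.strip name).toList.filter (fun c => !(c == ' ')) := by
    rw [PySem.Str.toList_replace]
    exact pvReplace_filter _
  rcases pvStrip_head name.toList with hnil | ⟨h, t, hcons, hsp⟩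
  · -- stripped name empty: both sides are false
    have hstrip : PySem.Str.strip name = "" :=
      pvStringEmpty _ (by rw [PySem.Str.toList_strip]; exact hnil)
    rw [hstrip]
    simp only [show (("" : String) == "") = true from rfl, Bool.or_true, if_true,
      PySem.Str.strIsalpha_eq, PySem.Str.toList_replace]
    decide
  · -- stripped name nonempty
    have hlist : (PySem.Str.strip name).toList = h :: t := by
      rw [PySem.Str.toList_strip]; exact hcons
    have hne : (PySem.Str.strip name == "") = false := by
      simp only [beq_eq_false_iff_ne, ne_eq]
      intro h0; rw [h0] at hlist; simp at hlist
    have hname : (name == "") = false := by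
      simp only [beq_eq_false_iff_ne, ne_eq]
      intro h0
      rw [h0] at hcons; simp [PySem.Chars.strip, PySem.Chars.lstrip, PySem.Chars.rstrip] at hcons
    rw [hname, hne]
    simp only [Bool.or_self, Bool.false_eq_true, if_false]
    -- head of the stripped name is not a space
    have hhsp : (h == ' ') = false := by
      cases hq : (h == ' ')
      · rfl
      · exfalso
        rw [show h = ' ' from beq_iff_eq.mp hq] at hsp
        exact absurd hsp (by decide)
    -- left side: map through upper, then per-character translation
    have hA : pvA_loop (PySem.Str.upper (PySem.Str.strip name)).toList
        = (h :: t).all (fun c => (c == ' ') || (decide (c.toNat ≤ 127) && PySem.Chars.isalpha c)) := by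
      rw [pvLoop_eq_all, PySem.Str.toList_upper, hlist, PySem.Chars.upper, List.all_map]
      exact congrArg _ (funext fun c => pvPerChar c)
    -- right side: the filtered list is nonempty, so strIsalpha is its 'all'
    have hrep' : (PySem.Str.replace (PySem.Str.strip name) " " "").toList
        = h :: t.filter (fun c => !(c == ' ')) := by
      simp [hrep, hlist, hhsp]
    have hBalpha : PySem.Str.strIsalpha (PySem.Str.replace (PySem.Str.strip name) " " "")
        = ((PySem.Str.strip name).toList.filter (fun c => !(c == ' '))).all PySem.Chars.isalpha := by
      simp [PySem.Str.strIsalpha_eq, PySem.Chars.strIsalpha, hrep', hlist, hhsp]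
    rw [hA, hBalpha, hrep, hlist]
    rw [pvFilterAll, pvFilterAll]
    rw [Bool.eq_iff_iff]
    simp only [Bool.and_eq_true, List.all_eq_true, Bool.or_eq_true, Bool.and_eq_true]
    constructor
    · intro hall
      exact ⟨fun c hc => (hall c hc).imp id And.left,
             fun c hc => (hall c hc).imp id And.right⟩
    · intro ⟨h1, h2⟩ c hc
      rcases h1 c hc with hc1 | hc1
      · exact Or.inl hc1
      · rcases h2 c hc with hc2 | hc2
        · exact Or.inl hc2
        · exact Or.inr ⟨hc1, hc2⟩
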